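-- pv_equiv track=rewrite | github.com/s1sun/TCR-BCR-analysis-and-result-visualization | immune_profiler_V1_6.py | findmatchedpos
-- ===== SOURCE A (Python) =====
-- def findmatchedpos(seg, subs, fixpos):
--     """
--     Finds the position of a substring in a string, with some flexibility.
--
--     Parameters:
--     seg (str): The string to search within.
--     subs (str): The substring to search for.
--     fixpos (int): Position within the substring to keep fixed.
--
--     Returns:
--     int: The last position where the substring (or a variation) is found, or -1 if not found.
--     """
--     poslist = []
--     pos = seg.find(subs)
--     while pos >= 0:
--         poslist.append(pos)
--         pos = seg.find(subs, pos + 1)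
--
--     if not poslist:
--         # Generate variations of the substring
--         l_subs = len(subs)
--         atcg = ["A", "T", "C", "G"]
--         for count in range(l_subs):
--             if count != fixpos:
--                 for base in atcg:
--                     temp = subs[:count] + base + subs[count+1:]
--                     pos = seg.find(temp)
--                     while pos >= 0:
--                         if pos not in poslist:
--                             poslist.append(pos)
--                         pos = seg.find(temp, pos + 1)
--
--     poslist.sort()
--     return poslist[-1] if poslist else -1
-- ===== SOURCE B (Python) =====
-- def _window(seg, subs, pos):
--     """Mismatch index of seg[pos:pos+len(subs)] vs subs: -1 if equal, None if >1 mismatches."""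
--     mism = -1
--     for j in range(len(subs)):
--         if seg[pos + j] != subs[j]:
--             if mism >= 0:
--                 return None
--             mism = j
--     return mism
--
--
-- def findmatchedpos(seg, subs, fixpos):
--     # Single right-to-left scan: return the first exact window (= last exact
--     # occurrence); otherwise the highest window at Hamming distance exactly 1
--     # whose mismatch index differs from fixpos and whose seg base is in "ATCG".
--     near = -1
--     for pos in range(len(seg) - len(subs), -1, -1):
--         mism = _window(seg, subs, pos)
--         if mism is None:
--             continue
--         if mism == -1:
--             return pos
--         if near == -1 and mism != fixpos and seg[pos + mism] in "ATCG":
--             near = pos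
--     return near
-- ===== Notes on version B (the rewrite author's own statement) =====
-- stated objective: faster
-- what changed: A repeatedly calls seg.find for subs and for every one-base variation of subs (4 per non-fixed position), collects all hit positions, sorts them and takes the last; B makes a single right-to-left scan of seg comparing each window against subs once, returning the first exact window, else the highest window with exactly one mismatch at an index != fixpos whose seg base is in 'ATCG'.
import Mathlib
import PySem

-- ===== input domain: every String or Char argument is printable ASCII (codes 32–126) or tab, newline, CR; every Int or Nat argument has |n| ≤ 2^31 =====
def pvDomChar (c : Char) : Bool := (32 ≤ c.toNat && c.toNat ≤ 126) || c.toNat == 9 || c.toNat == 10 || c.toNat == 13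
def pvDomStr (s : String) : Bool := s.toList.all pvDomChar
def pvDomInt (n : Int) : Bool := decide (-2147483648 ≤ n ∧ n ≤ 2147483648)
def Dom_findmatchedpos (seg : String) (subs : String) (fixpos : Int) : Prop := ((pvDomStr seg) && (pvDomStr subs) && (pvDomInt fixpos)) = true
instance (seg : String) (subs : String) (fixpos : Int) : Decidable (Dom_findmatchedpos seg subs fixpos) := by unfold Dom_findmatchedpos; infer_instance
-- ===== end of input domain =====

-- B replaces A's repeated seg.find scans over every 1-base variation of subs by a
-- single right-to-left scan of seg; objective: faster (one O(n*m) pass instead of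
-- O(m) full-string searches per candidate position).

-- ===== PORT A =====
def pvAtcg : List Char := ['A', 'T', 'C', 'G']

-- "pos = seg.find(subs); while pos >= 0: poslist.append(pos); pos = seg.find(subs, pos+1)"
-- (fuel bounds the iteration count; positions strictly increase, so s.length+2 is enough)
def pvFindLoopA (s sub : List Char) (pos : Int) (acc : List Int) : Nat → List Int
  | 0 => acc
  | fuel + 1 =>
    if 0 ≤ pos then
      pvFindLoopA s sub (PySem.Chars.findFrom s sub (pos + 1)) (acc ++ [pos]) fuel
    else acc

-- inner "while pos >= 0: if pos not in poslist: poslist.append(pos); pos = seg.find(temp, pos+1)"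
def pvVarLoopA (s temp : List Char) (pos : Int) (acc : List Int) : Nat → List Int
  | 0 => acc
  | fuel + 1 =>
    if 0 ≤ pos then
      pvVarLoopA s temp (PySem.Chars.findFrom s temp (pos + 1))
        (if pos ∈ acc then acc else acc ++ [pos]) fuel
    else acc

-- temp = subs[:count] + base + subs[count+1:]
def pvTempA (sub : List Char) (count : Int) (base : Char) : List Char :=
  PySem.List.slice sub none (some count) ++ [base] ++ PySem.List.slice sub (some (count + 1)) none

-- "for count in range(l_subs): if count != fixpos: for base in atcg: ... find loop"
def pvVariationsA (s sub : List Char) (fixpos : Int) : List Int :=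
  (PySem.List.pyRange 0 (sub.length : Int)).foldl
    (fun acc count =>
      if count ≠ fixpos then
        pvAtcg.foldl
          (fun acc base =>
            pvVarLoopA s (pvTempA sub count base)
              (PySem.Chars.find s (pvTempA sub count base)) acc (s.length + 2))
          acc
      else acc)
    []

def findmatchedpos (seg : String) (subs : String) (fixpos : Int) : Int :=
  let s := seg.toList
  let sub := subs.toList
  let poslist := pvFindLoopA s sub (PySem.Chars.find s sub) [] (s.length + 2)
  let poslist := if poslist = [] then pvVariationsA s sub fixpos else poslist
  -- "poslist.sort(); return poslist[-1] if poslist else -1"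
  match PySem.List.pyGet? (PySem.List.sorted poslist (fun x => x)) (-1) with
  | some v => v
  | none => -1

-- ===== PORT B =====
-- "_window": mismatch index of seg[pos:pos+len(subs)] vs subs: -1 if equal, none if > 1 mismatches.
-- (seg[pos+j] is always in range at call sites — pos ≤ len(seg) - len(subs) — so getD is exact there)
def pvWinGo (s : List Char) : List Char → Nat → Nat → Int → Option Int
  | [], _, _, mism => some mism
  | c :: rest, pos, j, mism =>
    if s.getD (pos + j) ' ' ≠ c then
      if 0 ≤ mism then none else pvWinGo s rest pos (j + 1) (j : Int)
    else pvWinGo s rest pos (j + 1) mism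

def pvWindowB (s sub : List Char) (pos : Nat) : Option Int :=
  pvWinGo s sub pos 0 (-1)

-- "for pos in range(len(seg)-len(subs), -1, -1): ..." — iteration k+1 handles pos = k
def pvScanB (s sub : List Char) (fixpos : Int) : Nat → Int → Int
  | 0, near => near
  | k + 1, near =>
    match pvWindowB s sub k with
    | none => pvScanB s sub fixpos k near
    | some mism =>
      if mism = -1 then (k : Int)
      else if near = -1 ∧ mism ≠ fixpos ∧ s.getD (k + mism.toNat) ' ' ∈ pvAtcg then
        pvScanB s sub fixpos k (k : Int)
      else pvScanB s sub fixpos k near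

def findmatchedpos_alt (seg : String) (subs : String) (fixpos : Int) : Int :=
  let s := seg.toList
  let sub := subs.toList
  pvScanB s sub fixpos (s.length + 1 - sub.length) (-1)

-- ===== PRECONDITION & SPEC =====
def Spec_findmatchedpos (seg : String) (subs : String) (fixpos : Int) (out : Int) : Prop := out = findmatchedpos_alt seg subs fixpos
instance (seg : String) (subs : String) (fixpos : Int) (out : Int) : Decidable (Spec_findmatchedpos seg subs fixpos out) := by unfold Spec_findmatchedpos; infer_instance

-- ===== CLAIM (what is proved, stated in full; the proofs are below) =====
def Claim_equal_findmatchedpos : Prop := ∀ (seg : String) (subs : String) (fixpos : Int), Dom_findmatchedpos seg subs fixpos → Spec_findmatchedpos seg subs fixpos (findmatchedpos seg subs fixpos)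

-- ===== LEMMAS AND PROOFS =====

-- p is an exact occurrence position of sub in s
def pvOcc (s sub : List Char) (p : Nat) : Prop := p ≤ s.length ∧ sub <+: s.drop p

-- p is an occurrence position of some 1-base variation of sub at an index ≠ fixpos
def pvVarAt (s sub : List Char) (fixpos : Int) (p : Nat) : Prop :=
  p ≤ s.length ∧ ∃ c : Nat, c < sub.length ∧ (c : Int) ≠ fixpos ∧
    ∃ base ∈ pvAtcg, pvTempA sub (c : Int) base <+: s.drop p

-- the largest p < k with P p, as an Int (-1 if none)
def pvBest (P : Nat → Bool) : Nat → Int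
  | 0 => -1
  | k + 1 => if P k then (k : Int) else pvBest P k

def pvPE (s sub : List Char) (k : Nat) : Bool := pvWindowB s sub k == some (-1)

def pvPN (s sub : List Char) (fixpos : Int) (k : Nat) : Bool :=
  match pvWindowB s sub k with
  | none => false
  | some mism => decide (mism ≠ -1) && decide (mism ≠ fixpos) &&
      decide (s.getD (k + mism.toNat) ' ' ∈ pvAtcg)

lemma pvFindFrom_big (s sub : List Char) (start : Int) (h0 : 0 ≤ start)
    (h : (s.length : Int) < start) : PySem.Chars.findFrom s sub start = -1 := by
  simp only [PySem.Chars.findFrom]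
  split_ifs with h1 h2 <;> omega

lemma pvPrefix_pointwise (s sub : List Char) (p : Nat) (hp : p ≤ s.length) :
    sub <+: s.drop p ↔
      p + sub.length ≤ s.length ∧ ∀ i < sub.length, s.getD (p + i) ' ' = sub.getD i ' ' := by
  constructor
  · intro hpre
    have hlen := hpre.length_le
    simp only [List.length_drop] at hlen
    refine ⟨by omega, fun i hi => ?_⟩
    have := hpre.getElem (i := i) hi
    rw [List.getElem_drop] at this
    rw [List.getD_eq_getElem _ _ (by omega), List.getD_eq_getElem _ _ hi, ← this]
  · rintro ⟨hlen, hpt⟩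
    rw [List.prefix_iff_eq_take]
    apply List.ext_getElem (by simp [List.length_drop]; omega)
    intro i h1 h2
    rw [List.getElem_take, List.getElem_drop]
    have := hpt i h1
    rw [List.getD_eq_getElem _ _ (by omega), List.getD_eq_getElem _ _ h1] at this
    exact this.symm

lemma pvFindLoopA_mem (s sub : List Char) :
    ∀ (fuel start : Nat) (acc : List Int), start ≤ s.length + 1 → s.length + 2 ≤ fuel + start →
      ∀ x, x ∈ pvFindLoopA s sub (PySem.Chars.findFrom s sub (start : Int)) acc fuel ↔
        (x ∈ acc ∨ ∃ p : Nat, start ≤ p ∧ pvOcc s sub p ∧ x = (p : Int)) := by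
  intro fuel
  induction fuel with
  | zero => intro start acc h1 h2; omega
  | succ fuel ih =>
    intro start acc h1 h2 x
    by_cases hs : start = s.length + 1
    · subst hs
      rw [pvFindFrom_big s sub _ (by positivity) (by push_cast; omega)]
      simp only [pvFindLoopA]
      rw [if_neg (by norm_num)]
      constructor
      · exact Or.inl
      · rintro (h | ⟨p, hp1, ⟨hp2, _⟩, _⟩)
        · exact h
        · omega
    · have hsle : start ≤ s.length := by omega
      by_cases hr : PySem.Chars.findFrom s sub (start : Int) = -1
      · rw [hr]
        simp only [pvFindLoopA]
        rw [if_neg (by norm_num)]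
        have hnone : ¬ sub <:+: List.drop start s :=
          (PySem.Chars.findFrom_natCast_eq_neg_one_iff s sub start hsle).mp hr
        constructor
        · exact Or.inl
        · rintro (h | ⟨p, hp1, ⟨hp2, hp3⟩, rfl⟩)
          · exact h
          · exfalso
            apply hnone
            have hdd : sub <+: List.drop (p - start) (List.drop start s) := by
              rw [List.drop_drop, show start + (p - start) = p by omega]
              exact hp3
            exact hdd.isInfix.trans (List.drop_suffix _ _).isInfix
      · obtain ⟨hge, hpre, hmin⟩ := PySem.Chars.findFrom_natCast_spec s sub start hsle hr
        set r := PySem.Chars.findFrom s sub (start : Int) with hrdef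
        have hr0 : (0 : Int) ≤ r := le_trans (by positivity) hge
        have hrlen : r ≤ (s.length : Int) := by
          rw [hrdef, PySem.Chars.findFrom_natCast s sub start hsle]
          split_ifs with h
          · omega
          · have := PySem.Chars.find_le_length (List.drop start s) sub
            simp only [List.length_drop] at this
            omega
        have htn : r.toNat ≤ s.length := by omega
        have hstn : start ≤ r.toNat := by omega
        have hcast : r = ((r.toNat : Nat) : Int) := (Int.toNat_of_nonneg hr0).symm
        simp only [pvFindLoopA]
        rw [if_pos hr0]
        rw [show r + 1 = ((r.toNat + 1 : Nat) : Int) by omega]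
        rw [ih (r.toNat + 1) (acc ++ [r]) (by omega) (by omega) x]
        constructor
        · rintro (hx | ⟨p, hp1, hocc, rfl⟩)
          · rcases List.mem_append.mp hx with h | h
            · exact Or.inl h
            · right
              refine ⟨r.toNat, hstn, ⟨htn, hpre⟩, ?_⟩
              simp at h
              rw [h]
              exact hcast
          · exact Or.inr ⟨p, by omega, hocc, rfl⟩
        · rintro (hx | ⟨p, hp1, hocc, rfl⟩)
          · exact Or.inl (List.mem_append.mpr (Or.inl hx))
          · rcases Nat.lt_trichotomy p r.toNat with hlt | heq | hgt
            · exact absurd hocc.2 (hmin p hp1 hlt)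
            · subst heq
              exact Or.inl (List.mem_append.mpr (Or.inr (List.mem_singleton.mpr hcast.symm)))
            · exact Or.inr ⟨p, by omega, hocc, rfl⟩

lemma pvVarLoopA_mem (s temp : List Char) :
    ∀ (fuel start : Nat) (acc : List Int), start ≤ s.length + 1 → s.length + 2 ≤ fuel + start →
      ∀ x, x ∈ pvVarLoopA s temp (PySem.Chars.findFrom s temp (start : Int)) acc fuel ↔
        (x ∈ acc ∨ ∃ p : Nat, start ≤ p ∧ pvOcc s temp p ∧ x = (p : Int)) := by
  intro fuel
  induction fuel with
  | zero => intro start acc h1 h2; omega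
  | succ fuel ih =>
    intro start acc h1 h2 x
    by_cases hs : start = s.length + 1
    · subst hs
      rw [pvFindFrom_big s temp _ (by positivity) (by push_cast; omega)]
      simp only [pvVarLoopA]
      rw [if_neg (by norm_num)]
      constructor
      · exact Or.inl
      · rintro (h | ⟨p, hp1, ⟨hp2, _⟩, _⟩)
        · exact h
        · omega
    · have hsle : start ≤ s.length := by omega
      by_cases hr : PySem.Chars.findFrom s temp (start : Int) = -1
      · rw [hr]
        simp only [pvVarLoopA]
        rw [if_neg (by norm_num)]
        have hnone : ¬ temp <:+: List.drop start s :=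
          (PySem.Chars.findFrom_natCast_eq_neg_one_iff s temp start hsle).mp hr
        constructor
        · exact Or.inl
        · rintro (h | ⟨p, hp1, ⟨hp2, hp3⟩, rfl⟩)
          · exact h
          · exfalso
            apply hnone
            have hdd : temp <+: List.drop (p - start) (List.drop start s) := by
              rw [List.drop_drop, show start + (p - start) = p by omega]
              exact hp3
            exact hdd.isInfix.trans (List.drop_suffix _ _).isInfix
      · obtain ⟨hge, hpre, hmin⟩ := PySem.Chars.findFrom_natCast_spec s temp start hsle hr
        set r := PySem.Chars.findFrom s temp (start : Int) with hrdef
        have hr0 : (0 : Int) ≤ r := le_trans (by positivity) hge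
        have hrlen : r ≤ (s.length : Int) := by
          rw [hrdef, PySem.Chars.findFrom_natCast s temp start hsle]
          split_ifs with h
          · omega
          · have := PySem.Chars.find_le_length (List.drop start s) temp
            simp only [List.length_drop] at this
            omega
        have htn : r.toNat ≤ s.length := by omega
        have hstn : start ≤ r.toNat := by omega
        have hcast : r = ((r.toNat : Nat) : Int) := (Int.toNat_of_nonneg hr0).symm
        simp only [pvVarLoopA]
        rw [if_pos hr0]
        rw [show r + 1 = ((r.toNat + 1 : Nat) : Int) by omega]
        have hstepmem : ∀ y, y ∈ (if r ∈ acc then acc else acc ++ [r]) ↔ (y ∈ acc ∨ y = r) := by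
          intro y
          split_ifs with h
          · constructor
            · exact Or.inl
            · rintro (hy | rfl)
              · exact hy
              · exact h
          · rw [List.mem_append]
            simp
        rw [ih (r.toNat + 1) (if r ∈ acc then acc else acc ++ [r]) (by omega) (by omega) x]
        constructor
        · rintro (hx | ⟨p, hp1, hocc, rfl⟩)
          · rcases (hstepmem x).mp hx with h | h
            · exact Or.inl h
            · right
              refine ⟨r.toNat, hstn, ⟨htn, hpre⟩, ?_⟩
              rw [h]
              exact hcast
          · exact Or.inr ⟨p, by omega, hocc, rfl⟩
        · rintro (hx | ⟨p, hp1, hocc, rfl⟩)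
          · exact Or.inl ((hstepmem x).mpr (Or.inl hx))
          · rcases Nat.lt_trichotomy p r.toNat with hlt | heq | hgt
            · exact absurd hocc.2 (hmin p hp1 hlt)
            · subst heq
              exact Or.inl ((hstepmem _).mpr (Or.inr hcast.symm))
            · exact Or.inr ⟨p, by omega, hocc, rfl⟩

lemma pvFoldlMem {α : Type} (L : List α) (f : List Int → α → List Int) (Q : α → Int → Prop)
    (hf : ∀ acc c x, x ∈ f acc c ↔ (x ∈ acc ∨ Q c x)) :
    ∀ acc x, x ∈ L.foldl f acc ↔ (x ∈ acc ∨ ∃ c ∈ L, Q c x) := by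
  induction L with
  | nil => simp
  | cons c L ih =>
    intro acc x
    simp only [List.foldl_cons, ih (f acc c) x, hf acc c x, List.mem_cons]
    constructor
    · rintro ((h | h) | ⟨d, hd, hQ⟩)
      · exact Or.inl h
      · exact Or.inr ⟨c, Or.inl rfl, h⟩
      · exact Or.inr ⟨d, Or.inr hd, hQ⟩
    · rintro (h | ⟨d, (rfl | hd), hQ⟩)
      · exact Or.inl (Or.inl h)
      · exact Or.inl (Or.inr hQ)
      · exact Or.inr ⟨d, hd, hQ⟩

lemma pvVariationsA_inner_mem (s sub : List Char) (count : Int) (acc : List Int) (x : Int) :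
    x ∈ pvAtcg.foldl
        (fun acc base =>
          pvVarLoopA s (pvTempA sub count base)
            (PySem.Chars.find s (pvTempA sub count base)) acc (s.length + 2))
        acc ↔
      (x ∈ acc ∨ ∃ base ∈ pvAtcg, ∃ p : Nat, pvOcc s (pvTempA sub count base) p ∧ x = (p : Int)) := by
  refine pvFoldlMem pvAtcg _
    (fun base y => ∃ p : Nat, pvOcc s (pvTempA sub count base) p ∧ y = (p : Int)) ?_ acc x
  intro acc2 base y2
  have h0 : PySem.Chars.find s (pvTempA sub count base) =
      PySem.Chars.findFrom s (pvTempA sub count base) ((0 : Nat) : Int) := by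
    rw [Nat.cast_zero, PySem.Chars.findFrom_zero]
  rw [h0, pvVarLoopA_mem s (pvTempA sub count base) (s.length + 2) 0 acc2 (by omega) (by omega) y2]
  simp only [Nat.zero_le, true_and]

lemma pvVariationsA_mem (s sub : List Char) (fixpos : Int) (x : Int) :
    x ∈ pvVariationsA s sub fixpos ↔ ∃ p : Nat, pvVarAt s sub fixpos p ∧ x = (p : Int) := by
  rw [pvVariationsA]
  rw [pvFoldlMem (PySem.List.pyRange 0 (sub.length : Int)) _
    (fun count y => count ≠ fixpos ∧ ∃ base ∈ pvAtcg, ∃ p : Nat,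
      pvOcc s (pvTempA sub count base) p ∧ y = (p : Int))
    (by
      intro acc count y
      split_ifs with hcf
      · rw [pvVariationsA_inner_mem s sub count acc y]
        constructor
        · rintro (h | ⟨base, hb, hp⟩)
          · exact Or.inl h
          · exact Or.inr ⟨hcf, base, hb, hp⟩
        · rintro (h | ⟨hne, base, hb, hp⟩)
          · exact Or.inl h
          · exact Or.inr ⟨base, hb, hp⟩
      · simp [hcf])
    [] x]
  simp only [List.not_mem_nil, false_or]
  constructor
  · rintro ⟨count, hcr, hne, base, hb, p, ⟨hpl, hpre⟩, rfl⟩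
    rw [PySem.List.mem_pyRange_one] at hcr
    have hcnat : count = ((count.toNat : Nat) : Int) := by omega
    have hclt : count.toNat < sub.length := by omega
    refine ⟨p, ⟨hpl, count.toNat, hclt, by rw [← hcnat]; exact hne, base, hb, ?_⟩, rfl⟩
    rw [← hcnat]
    exact hpre
  · rintro ⟨p, ⟨hpl, c, hc, hcf, base, hb, hpre⟩, rfl⟩
    exact ⟨(c : Int), PySem.List.mem_pyRange_one.mpr ⟨by positivity, by exact_mod_cast hc⟩,
      hcf, base, hb, p, ⟨hpl, hpre⟩, rfl⟩

lemma pvTempA_take_drop (sub : List Char) (c : Nat) (base : Char) :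
    pvTempA sub (c : Int) base = sub.take c ++ [base] ++ sub.drop (c + 1) := by
  rw [pvTempA, PySem.List.slice_to sub (by positivity), PySem.List.slice_from sub (by positivity)]
  norm_num

lemma pvTempA_length (sub : List Char) (c : Nat) (base : Char) (hc : c < sub.length) :
    (pvTempA sub (c : Int) base).length = sub.length := by
  rw [pvTempA_take_drop]
  simp [List.length_append, List.length_take, List.length_drop]
  omega

lemma pvTempA_getD (sub : List Char) (c : Nat) (base : Char) (hc : c < sub.length)
    (i : Nat) (hi : i < sub.length) :
    (pvTempA sub (c : Int) base).getD i ' ' = if i = c then base else sub.getD i ' ' := by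
  rw [pvTempA_take_drop]
  have hlt : (sub.take c).length = c := by simp [List.length_take]; omega
  rcases Nat.lt_trichotomy i c with h | h | h
  · rw [if_neg (by omega)]
    rw [List.getD_eq_getElem _ _ (by simp [List.length_append, List.length_take, List.length_drop]; omega),
        List.getD_eq_getElem _ _ hi]
    rw [List.getElem_append_left (by simp [hlt]; omega)]
    rw [List.getElem_append_left (by omega)]
    simp [List.getElem_take]
  · subst h
    rw [if_pos rfl]
    rw [List.getD_eq_getElem _ _ (by simp [List.length_append, List.length_take, List.length_drop]; omega)]
    rw [List.getElem_append_left (by simp [hlt])]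
    rw [List.getElem_append_right (by omega)]
    simp [hlt]
  · rw [if_neg (by omega)]
    rw [List.getD_eq_getElem _ _ (by simp [List.length_append, List.length_take, List.length_drop]; omega),
        List.getD_eq_getElem _ _ hi]
    rw [List.getElem_append_right (by simp [hlt]; omega)]
    simp only [List.length_append, hlt, List.length_cons, List.getElem_drop]
    congr 1
    simp
    omega

lemma pvTempA_eq_self (sub : List Char) (c : Nat) (hc : c < sub.length) :
    pvTempA sub (c : Int) (sub.getD c ' ') = sub := by
  apply List.ext_getElem (by rw [pvTempA_length _ _ _ hc])
  intro i h1 h2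
  have h3 : i < sub.length := h2
  have := pvTempA_getD sub c (sub.getD c ' ') hc i h3
  rw [List.getD_eq_getElem _ _ h1, List.getD_eq_getElem _ _ h3] at this
  rw [this]
  split_ifs with h
  · subst h; rw [List.getD_eq_getElem _ _ h3]
  · rfl

lemma pvSortedLast (l : List Int) (hne : l ≠ []) :
    ∃ v, PySem.List.pyGet? (PySem.List.sorted l (fun x => x)) (-1) = some v ∧
      v ∈ l ∧ ∀ x ∈ l, x ≤ v := by
  have hpos : 0 < l.length := List.length_pos_iff.mpr hne
  have hlen : (PySem.List.sorted l (fun x => x)).length = l.length :=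
    PySem.List.length_sorted l (fun x => x) false
  refine ⟨(PySem.List.sorted l (fun x => x))[l.length - 1]'(by omega), ?_, ?_, ?_⟩
  · simp only [PySem.List.pyGet?, PySem.List.pyIdx?, hlen]
    rw [if_neg (by omega), if_pos (by omega)]
    simp only [Option.bind_some]
    have : l.length - (-(-1 : Int)).toNat = l.length - 1 := by omega
    rw [this, List.getElem?_eq_getElem (by omega)]
  · rw [← PySem.List.mem_sorted l (fun x => x) false]
    exact List.getElem_mem _
  · intro x hx
    rw [← PySem.List.mem_sorted l (fun x => x) false] at hx
    obtain ⟨i, hi, rfl⟩ := List.mem_iff_getElem.mp hx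
    exact PySem.List.sorted_id_getElem_mono l (by omega) (by omega)

lemma pvWinGo_of_nonneg (s : List Char) :
    ∀ (rest : List Char) (pos j : Nat) (mism : Int), 0 ≤ mism →
      pvWinGo s rest pos j mism =
        if ∀ i < rest.length, s.getD (pos + j + i) ' ' = rest.getD i ' ' then some mism
        else none := by
  intro rest
  induction rest with
  | nil => intro pos j mism h; simp [pvWinGo]
  | cons c rest ih =>
    intro pos j mism h
    simp only [pvWinGo]
    by_cases hc : s.getD (pos + j) ' ' = c
    · rw [if_neg (by simpa using hc)]
      rw [ih pos (j + 1) mism h]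
      have hcond : (∀ i < rest.length, s.getD (pos + (j + 1) + i) ' ' = rest.getD i ' ') ↔
          (∀ i < (c :: rest).length, s.getD (pos + j + i) ' ' = (c :: rest).getD i ' ') := by
        constructor
        · intro hall i hi
          match i with
          | 0 => simpa using hc
          | Nat.succ i =>
            have := hall i (by simp at hi; omega)
            rw [show pos + j + (i + 1) = pos + (j + 1) + i by omega]
            simpa using this
        · intro hall i hi
          have := hall (i + 1) (by simp; omega)
          rw [show pos + (j + 1) + i = pos + j + (i + 1) by omega]
          simpa using this
      rw [if_congr hcond rfl rfl]
    · rw [if_pos (by simpa using hc), if_pos h, if_neg]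
      push Not
      exact ⟨0, by simp, by simpa using hc⟩

lemma pvWinGo_neg (s : List Char) :
    ∀ (rest : List Char) (pos j : Nat),
      pvWinGo s rest pos j (-1) =
        match (List.range rest.length).filter
            (fun i => decide (s.getD (pos + j + i) ' ' ≠ rest.getD i ' ')) with
        | [] => some (-1)
        | [i] => some ((j + i : Nat) : Int)
        | _ => none := by
  intro rest
  induction rest with
  | nil => intro pos j; simp [pvWinGo]
  | cons c rest ih =>
    intro pos j
    rw [show List.range (c :: rest).length = 0 :: List.map Nat.succ (List.range rest.length) by
      simp [List.range_succ_eq_map]]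
    rw [List.filter_cons, List.filter_map]
    have hfc : (fun i => decide (s.getD (pos + j + i) ' ' ≠ (c :: rest).getD i ' ')) ∘ Nat.succ =
        fun i => decide (s.getD (pos + (j + 1) + i) ' ' ≠ rest.getD i ' ') := by
      funext i
      simp only [Function.comp, List.getD_cons_succ]
      rw [show pos + j + (i + 1) = pos + (j + 1) + i by omega]
    rw [hfc]
    simp only [pvWinGo]
    by_cases hc : s.getD (pos + j) ' ' = c
    · rw [if_neg (by simpa using hc)]
      rw [if_neg (by simpa using hc)]
      rw [ih pos (j + 1)]
      rcases hF : (List.range rest.length).filter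
          (fun i => decide (s.getD (pos + (j + 1) + i) ' ' ≠ rest.getD i ' ')) with _ | ⟨i, t⟩
      · simp
      · rcases t with _ | ⟨i2, t2⟩
        · simp only [List.map_cons, List.map_nil]
          congr 2
          omega
        · simp
    · rw [if_pos (by simpa using hc)]
      rw [if_neg (by norm_num)]
      rw [if_pos (by simpa using hc)]
      rw [pvWinGo_of_nonneg s rest pos (j + 1) (j : Int) (by positivity)]
      rcases hF : (List.range rest.length).filter
          (fun i => decide (s.getD (pos + (j + 1) + i) ' ' ≠ rest.getD i ' ')) with _ | ⟨i, t⟩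
      · have hcond : ∀ i < rest.length, s.getD (pos + (j + 1) + i) ' ' = rest.getD i ' ' := by
          intro i hi
          have := List.filter_eq_nil_iff.mp hF i (by simp [hi])
          simpa using this
        rw [if_pos hcond]
        simp
      · have hmem : i ∈ (List.range rest.length).filter
            (fun i => decide (s.getD (pos + (j + 1) + i) ' ' ≠ rest.getD i ' ')) := by
          rw [hF]; simp
        rw [List.mem_filter, List.mem_range] at hmem
        have hcond : ¬ ∀ i < rest.length, s.getD (pos + (j + 1) + i) ' ' = rest.getD i ' ' := by
          intro hall
          have h2 : s.getD (pos + (j + 1) + i) ' ' ≠ rest.getD i ' ' := by simpa using hmem.2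
          exact h2 (hall i hmem.1)
        rw [if_neg hcond]
        simp

lemma pvWindowB_eq (s sub : List Char) (k : Nat) :
    pvWindowB s sub k =
      match (List.range sub.length).filter
          (fun i => decide (s.getD (k + i) ' ' ≠ sub.getD i ' ')) with
      | [] => some (-1)
      | [i] => some ((i : Nat) : Int)
      | _ => none := by
  rw [pvWindowB, pvWinGo_neg s sub k 0]
  simp only [Nat.add_zero, Nat.zero_add]

lemma pvOcc_bound (s sub : List Char) (p : Nat) (h : pvOcc s sub p) :
    p + sub.length ≤ s.length := by
  have h1 := h.1
  have := h.2.length_le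
  simp only [List.length_drop] at this
  omega

lemma pvVarAt_bound (s sub : List Char) (fixpos : Int) (p : Nat)
    (h : pvVarAt s sub fixpos p) : p + sub.length ≤ s.length := by
  obtain ⟨hp, c, hc, _, base, _, hpre⟩ := h
  have := hpre.length_le
  rw [pvTempA_length sub c base hc] at this
  simp only [List.length_drop] at this
  omega

lemma pvOcc_exists_of_infix (s sub : List Char) (h : sub <:+: s) : ∃ p, pvOcc s sub p := by
  obtain ⟨j, hj⟩ := (PySem.Chars.exists_prefix_drop_iff_isIn sub s).2
    ((PySem.Chars.isIn_iff_infix sub s).mpr h)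
  by_cases hjn : j ≤ s.length
  · exact ⟨j, hjn, hj⟩
  · refine ⟨s.length, le_refl _, ?_⟩
    rw [List.drop_eq_nil_of_le (by omega)] at hj
    rw [List.drop_length]
    exact hj

lemma pvInfix_of_prefix_drop (s sub : List Char) (p : Nat) (h : sub <+: s.drop p) :
    sub <:+: s := h.isInfix.trans (List.drop_suffix p s).isInfix

lemma pvPE_iff (s sub : List Char) (k : Nat) (hk : k + sub.length ≤ s.length) :
    pvPE s sub k = true ↔ sub <+: s.drop k := by
  have hkn : k ≤ s.length := by omega
  rw [pvPE, pvWindowB_eq, pvPrefix_pointwise s sub k hkn]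
  rcases hF : (List.range sub.length).filter
      (fun i => decide (s.getD (k + i) ' ' ≠ sub.getD i ' ')) with _ | ⟨i, t⟩
  · constructor
    · intro _
      refine ⟨hk, fun i hi => ?_⟩
      have := List.filter_eq_nil_iff.mp hF i (by simp [hi])
      simpa using this
    · intro _
      simp
  · have hmem : i ∈ (List.range sub.length).filter
        (fun i => decide (s.getD (k + i) ' ' ≠ sub.getD i ' ')) := by rw [hF]; simp
    rw [List.mem_filter, List.mem_range] at hmem
    have hne : s.getD (k + i) ' ' ≠ sub.getD i ' ' := by simpa using hmem.2
    have hrhs : ¬ (k + sub.length ≤ s.length ∧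
        ∀ i < sub.length, s.getD (k + i) ' ' = sub.getD i ' ') := by
      rintro ⟨_, hpt⟩
      exact hne (hpt i hmem.1)
    rcases t with _ | ⟨i2, t2⟩
    · simp only [hrhs, iff_false]
      simp
    · simp only [hrhs, iff_false]
      simp

lemma pvPN_iff (s sub : List Char) (fixpos : Int) (k : Nat) (hk : k + sub.length ≤ s.length)
    (hno : ¬ sub <:+: s) :
    pvPN s sub fixpos k = true ↔ pvVarAt s sub fixpos k := by
  have hkn : k ≤ s.length := by omega
  rw [pvPN, pvWindowB_eq]
  rcases hF : (List.range sub.length).filter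
      (fun i => decide (s.getD (k + i) ' ' ≠ sub.getD i ' ')) with _ | ⟨i, t⟩
  · constructor
    · intro hb
      simp at hb
    · intro hvar
      exfalso
      have hpre : sub <+: s.drop k := by
        rw [pvPrefix_pointwise s sub k hkn]
        refine ⟨hk, fun i hi => ?_⟩
        have := List.filter_eq_nil_iff.mp hF i (by simp [hi])
        simpa using this
      exact hno (pvInfix_of_prefix_drop s sub k hpre)
  · have hmem : i ∈ (List.range sub.length).filter
        (fun i => decide (s.getD (k + i) ' ' ≠ sub.getD i ' ')) := by rw [hF]; simp
    rw [List.mem_filter, List.mem_range] at hmem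
    have hne : s.getD (k + i) ' ' ≠ sub.getD i ' ' := by simpa using hmem.2
    rcases t with _ | ⟨i2, t2⟩
    · -- exactly one mismatch, at index i
      have hall : ∀ i' < sub.length, i' ≠ i → s.getD (k + i') ' ' = sub.getD i' ' ' := by
        intro i' h1 h2
        by_contra h3
        have hmem' : i' ∈ (List.range sub.length).filter
            (fun i => decide (s.getD (k + i) ' ' ≠ sub.getD i ' ')) := by
          rw [List.mem_filter, List.mem_range]
          exact ⟨h1, by simpa using h3⟩
        rw [hF] at hmem'
        simp at hmem'
        exact h2 hmem'
      constructor
      · intro hb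
        simp only [Bool.and_eq_true, decide_eq_true_eq] at hb
        obtain ⟨⟨_, hfix⟩, hmemA⟩ := hb
        rw [Int.toNat_natCast] at hmemA
        refine ⟨hkn, i, hmem.1, hfix, s.getD (k + i) ' ', hmemA, ?_⟩
        rw [pvPrefix_pointwise s _ k hkn, pvTempA_length _ _ _ hmem.1]
        refine ⟨hk, fun i' hi' => ?_⟩
        rw [pvTempA_getD _ _ _ hmem.1 i' hi']
        by_cases he : i' = i
        · subst he; rw [if_pos rfl]
        · rw [if_neg he]
          exact hall i' hi' he
      · rintro ⟨_, c, hc, hcfix, base, hbase, hpre⟩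
        have hbn : base ≠ sub.getD c ' ' := by
          intro he
          rw [he, pvTempA_eq_self sub c hc] at hpre
          exact hno (pvInfix_of_prefix_drop s sub k hpre)
        rw [pvPrefix_pointwise s _ k hkn, pvTempA_length _ _ _ hc] at hpre
        obtain ⟨hlen', hpt⟩ := hpre
        have hptc := hpt c hc
        rw [pvTempA_getD _ _ _ hc c hc, if_pos rfl] at hptc
        have hcF : c ∈ (List.range sub.length).filter
            (fun i => decide (s.getD (k + i) ' ' ≠ sub.getD i ' ')) := by
          rw [List.mem_filter, List.mem_range]
          refine ⟨hc, decide_eq_true ?_⟩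
          rw [hptc]
          exact hbn
        rw [hF] at hcF
        simp at hcF
        subst hcF
        simp only [Bool.and_eq_true, decide_eq_true_eq]
        refine ⟨⟨by simp, hcfix⟩, ?_⟩
        rw [Int.toNat_natCast, hptc]
        exact hbase
    · -- at least two mismatches: window is none, and no variation can match
      constructor
      · intro hb
        simp at hb
      · rintro ⟨_, c, hc, hcfix, base, hbase, hpre⟩
        exfalso
        have hmem2 : i2 ∈ (List.range sub.length).filter
            (fun i => decide (s.getD (k + i) ' ' ≠ sub.getD i ' ')) := by rw [hF]; simp
        rw [List.mem_filter, List.mem_range] at hmem2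
        have hne2 : s.getD (k + i2) ' ' ≠ sub.getD i2 ' ' := by simpa using hmem2.2
        have hnd : ((List.range sub.length).filter
            (fun i => decide (s.getD (k + i) ' ' ≠ sub.getD i ' '))).Nodup :=
          (List.nodup_range).filter _
        rw [hF] at hnd
        have hii : i ≠ i2 := by
          intro he
          subst he
          simp at hnd
        rw [pvPrefix_pointwise s _ k hkn, pvTempA_length _ _ _ hc] at hpre
        obtain ⟨hlen', hpt⟩ := hpre
        have e1 := hpt i hmem.1
        have e2 := hpt i2 hmem2.1
        rw [pvTempA_getD _ _ _ hc i hmem.1] at e1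
        rw [pvTempA_getD _ _ _ hc i2 hmem2.1] at e2
        by_cases h1 : i = c
        · by_cases h2 : i2 = c
          · exact hii (h1.trans h2.symm)
          · rw [if_neg h2] at e2
            exact hne2 e2
        · rw [if_neg h1] at e1
          exact hne e1

lemma pvBest_eq_neg_one_iff (P : Nat → Bool) (k : Nat) :
    pvBest P k = -1 ↔ ∀ p < k, P p = false := by
  induction k with
  | zero => simp [pvBest]
  | succ k ih =>
    simp only [pvBest]
    split_ifs with h
    · constructor
      · intro hk; exact absurd hk (by simp)
      · intro hall; exact absurd (hall k (by omega)) (by simp [h])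
    · rw [ih]
      constructor
      · intro hall p hp
        rcases Nat.lt_succ_iff_lt_or_eq.mp hp with h1 | h1
        · exact hall p h1
        · subst h1; simpa using h
      · intro hall p hp; exact hall p (by omega)

lemma pvBest_spec (P : Nat → Bool) (k : Nat) (h : pvBest P k ≠ -1) :
    ∃ p, p < k ∧ P p = true ∧ pvBest P k = (p : Int) ∧
      ∀ q, q < k → P q = true → (q : Int) ≤ (p : Int) := by
  induction k with
  | zero => simp [pvBest] at h
  | succ k ih =>
    simp only [pvBest] at h ⊢
    split_ifs at h ⊢ with hk
    · exact ⟨k, by omega, hk, rfl, fun q hq _ => by exact_mod_cast Nat.lt_succ_iff.mp hq⟩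
    · obtain ⟨p, hp, hP, he, hmax⟩ := ih h
      refine ⟨p, by omega, hP, he, fun q hq hQ => ?_⟩
      rcases Nat.lt_succ_iff_lt_or_eq.mp hq with h1 | h1
      · exact hmax q h1 hQ
      · subst h1; simp [hQ] at hk

lemma pvScanB_spec (s sub : List Char) (fixpos : Int) :
    ∀ (k : Nat) (near : Int),
      pvScanB s sub fixpos k near =
        if pvBest (pvPE s sub) k = -1 then
          (if near = -1 then pvBest (pvPN s sub fixpos) k else near)
        else pvBest (pvPE s sub) k := by
  intro k
  induction k with
  | zero =>
    intro near
    simp only [pvScanB, pvBest]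
    split_ifs with h <;> omega
  | succ k ih =>
    intro near
    simp only [pvScanB]
    rcases hW : pvWindowB s sub k with _ | mism <;> dsimp only
    · have hpe : pvPE s sub k = false := by rw [pvPE, hW]; rfl
      have hpn : pvPN s sub fixpos k = false := by rw [pvPN, hW]
      rw [ih near]
      simp only [pvBest, hpe, hpn, Bool.false_eq_true, if_false]
    · by_cases hm : mism = -1
      · subst hm
        have hpe : pvPE s sub k = true := by rw [pvPE, hW]; rfl
        rw [if_pos rfl]
        have hbe : pvBest (pvPE s sub) (k + 1) = (k : Int) := by simp [pvBest, hpe]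
        rw [hbe, if_neg (show (k : Int) ≠ -1 by simp)]
      · rw [if_neg hm]
        have hpe : pvPE s sub k = false := by rw [pvPE, hW]; simp [hm]
        have hbe : pvBest (pvPE s sub) (k + 1) = pvBest (pvPE s sub) k := by
          simp [pvBest, hpe]
        by_cases hcond : near = -1 ∧ mism ≠ fixpos ∧ s.getD (k + mism.toNat) ' ' ∈ pvAtcg
        · rw [if_pos hcond, ih ((k : Nat) : Int), hbe]
          by_cases hbeK : pvBest (pvPE s sub) k = -1
          · rw [if_pos hbeK, if_pos hbeK]
            rw [if_neg (show (k : Int) ≠ -1 by simp)]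
            rw [if_pos hcond.1]
            have hpn : pvPN s sub fixpos k = true := by
              rw [pvPN, hW]
              simp only [ne_eq, Bool.and_eq_true, decide_eq_true_eq]
              exact ⟨⟨hm, hcond.2.1⟩, hcond.2.2⟩
            simp [pvBest, hpn]
          · rw [if_neg hbeK, if_neg hbeK]
        · rw [if_neg hcond, ih near, hbe]
          by_cases hbeK : pvBest (pvPE s sub) k = -1
          · rw [if_pos hbeK, if_pos hbeK]
            by_cases hnear : near = -1
            · rw [if_pos hnear, if_pos hnear]
              have hnc : ¬ (mism ≠ fixpos ∧ s.getD (k + mism.toNat) ' ' ∈ pvAtcg) :=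
                fun hcc => hcond ⟨hnear, hcc.1, hcc.2⟩
              have hpn : pvPN s sub fixpos k = false := by
                rw [pvPN, hW, Bool.eq_false_iff]
                simp only [ne_eq, Bool.and_eq_true, decide_eq_true_eq]
                rintro ⟨⟨_, h1⟩, h2⟩
                exact hnc ⟨h1, h2⟩
              simp [pvBest, hpn]
            · rw [if_neg hnear, if_neg hnear]
          · rw [if_neg hbeK, if_neg hbeK]

lemma pvBest_eq_max (P : Nat → Bool) (k : Nat) (v : Int)
    (hmem : ∃ p : Nat, v = (p : Int) ∧ p < k ∧ P p = true)
    (hmax : ∀ p : Nat, p < k → P p = true → (p : Int) ≤ v) :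
    pvBest P k = v := by
  obtain ⟨p, rfl, hp, hP⟩ := hmem
  have hne : pvBest P k ≠ -1 := by
    rw [Ne, pvBest_eq_neg_one_iff]
    push Not
    exact ⟨p, hp, by simp [hP]⟩
  obtain ⟨q, hq, hQ, he, hqmax⟩ := pvBest_spec P k hne
  have h1 := hqmax p hp hP
  have h2 := hmax q hq hQ
  omega

lemma pvMain (s sub : List Char) (fixpos : Int) :
    (match PySem.List.pyGet? (PySem.List.sorted
        (if pvFindLoopA s sub (PySem.Chars.find s sub) [] (s.length + 2) = []
         then pvVariationsA s sub fixpos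
         else pvFindLoopA s sub (PySem.Chars.find s sub) [] (s.length + 2)) (fun x => x)) (-1) with
     | some v => v
     | none => -1) = pvScanB s sub fixpos (s.length + 1 - sub.length) (-1) := by
  have hfind0 : PySem.Chars.find s sub = PySem.Chars.findFrom s sub ((0 : Nat) : Int) := by
    rw [Nat.cast_zero, PySem.Chars.findFrom_zero]
  have hloopmem : ∀ x, x ∈ pvFindLoopA s sub (PySem.Chars.find s sub) [] (s.length + 2) ↔
      ∃ p : Nat, pvOcc s sub p ∧ x = (p : Int) := by
    intro x
    rw [hfind0, pvFindLoopA_mem s sub (s.length + 2) 0 [] (by omega) (by omega) x]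
    simp only [List.not_mem_nil, false_or, Nat.zero_le, true_and]
  rw [pvScanB_spec]
  by_cases hin : sub <:+: s
  · obtain ⟨p0, hp0⟩ := pvOcc_exists_of_infix s sub hin
    have hne : pvFindLoopA s sub (PySem.Chars.find s sub) [] (s.length + 2) ≠ [] := by
      intro hnil
      have := (hloopmem (p0 : Int)).mpr ⟨p0, hp0, rfl⟩
      rw [hnil] at this
      exact List.not_mem_nil this
    rw [if_neg hne]
    obtain ⟨v, hvget, hvmem, hvmax⟩ := pvSortedLast _ hne
    rw [hvget]
    obtain ⟨p, hpocc, rfl⟩ := (hloopmem v).mp hvmem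
    have hpb := pvOcc_bound s sub p hpocc
    have hPE : ∀ q : Nat, q < s.length + 1 - sub.length → (pvPE s sub q = true ↔ pvOcc s sub q) := by
      intro q hq
      rw [pvPE_iff s sub q (by omega)]
      exact ⟨fun hp => ⟨by omega, hp⟩, And.right⟩
    have hbeq : pvBest (pvPE s sub) (s.length + 1 - sub.length) = (p : Int) := by
      apply pvBest_eq_max
      · exact ⟨p, rfl, by omega, (hPE p (by omega)).mpr hpocc⟩
      · intro q hq hQ
        exact hvmax (q : Int) ((hloopmem (q : Int)).mpr ⟨q, (hPE q hq).mp hQ, rfl⟩)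
    rw [hbeq, if_neg (by simp)]
  · have hfind : PySem.Chars.find s sub = -1 := (PySem.Chars.find_eq_neg_one_iff s sub).mpr hin
    have hnil : pvFindLoopA s sub (PySem.Chars.find s sub) [] (s.length + 2) = [] := by
      rw [hfind]
      simp only [pvFindLoopA]
      rw [if_neg (by norm_num)]
    rw [if_pos hnil]
    have hbE : pvBest (pvPE s sub) (s.length + 1 - sub.length) = -1 := by
      rw [pvBest_eq_neg_one_iff]
      intro q hq
      by_contra hq2
      have hq3 : pvPE s sub q = true := by simpa using hq2
      rw [pvPE_iff s sub q (by omega)] at hq3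
      exact hin (pvInfix_of_prefix_drop s sub q hq3)
    rw [hbE, if_pos rfl, if_pos rfl]
    by_cases hvnil : pvVariationsA s sub fixpos = []
    · rw [hvnil]
      have hsnil : PySem.List.sorted ([] : List Int) (fun x => x) = [] := by
        have := PySem.List.length_sorted ([] : List Int) (fun x => x) false
        exact List.eq_nil_of_length_eq_zero this
      rw [hsnil]
      have hget : PySem.List.pyGet? ([] : List Int) (-1) = none := rfl
      rw [hget]
      have hbN : pvBest (pvPN s sub fixpos) (s.length + 1 - sub.length) = -1 := by
        rw [pvBest_eq_neg_one_iff]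
        intro q hq
        by_contra hq2
        have hq3 : pvPN s sub fixpos q = true := by simp at hq2; exact hq2
        rw [pvPN_iff s sub fixpos q (by omega) hin] at hq3
        have hmem : (q : Int) ∈ pvVariationsA s sub fixpos :=
          (pvVariationsA_mem s sub fixpos (q : Int)).mpr ⟨q, hq3, rfl⟩
        rw [hvnil] at hmem
        exact List.not_mem_nil hmem
      rw [hbN]
    · obtain ⟨v, hvget, hvmem, hvmax⟩ := pvSortedLast _ hvnil
      rw [hvget]
      obtain ⟨p, hpvar, rfl⟩ := (pvVariationsA_mem s sub fixpos v).mp hvmem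
      have hbound := pvVarAt_bound s sub fixpos p hpvar
      symm
      apply pvBest_eq_max
      · refine ⟨p, rfl, by omega, ?_⟩
        rw [pvPN_iff s sub fixpos p (by omega) hin]
        exact hpvar
      · intro q hq hQ
        rw [pvPN_iff s sub fixpos q (by omega) hin] at hQ
        exact hvmax (q : Int) ((pvVariationsA_mem s sub fixpos (q : Int)).mpr ⟨q, hQ, rfl⟩)

-- ===== VERDICT (by name: the statement is the Claim_ definition above) =====
theorem findmatchedpos_spec : Claim_equal_findmatchedpos := by
  intro seg subs fixpos _
  show findmatchedpos seg subs fixpos = findmatchedpos_alt seg subs fixpos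
  exact pvMain seg.toList subs.toList fixpos
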